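-- pv_equiv track=rewrite | github.com/DanorRon/UCL-Scheduler | src/ucl_scheduler/solution_viewing/schedule_viewer.py | parse_solution_output
-- ===== SOURCE A (Python) =====
-- def parse_solution_output(output_text):
--     """Parse the solution output from the solver to extract schedule data."""
--     solutions = []
--     current_solution = None
--     current_day = None
--
--     lines = output_text.split('\n')
--
--     for line in lines:
--         if "=== Rehearsal Schedule Solution" in line:
--             if current_solution is not None:
--                 solutions.append(current_solution)
--             current_solution = [[[] for _ in range(12)] for _ in range(2)]  # 2 days, 12 shifts
--             current_day = None
--         elif "Day" in line and ":" in line: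
--             current_day = int(line.split("Day")[1].split(":")[0].strip())
--         elif "Shift" in line and ":" in line and current_day is not None and current_solution is not None:
--             parts = line.split(":")
--             shift_num = int(parts[0].split("Shift")[1].strip())
--             if len(parts) > 1 and parts[1].strip() != "No rehearsals":
--                 members = [m.strip() for m in parts[1].split(",")]
--                 current_solution[current_day][shift_num] = members
--
--     if current_solution is not None:
--         solutions.append(current_solution)
--
--     return solutions
-- ===== SOURCE B (Python) =====
-- _MARKER = "=== Rehearsal Schedule Solution"
--
--
-- def _split_blocks(lines):
--     """Partition lines into blocks, one per marker line, dropping text before the first marker."""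
--     blocks = []
--     i = 0
--     n = len(lines)
--     while i < n:
--         if _MARKER in lines[i]:
--             j = i + 1
--             while j < n and _MARKER not in lines[j]:
--                 j += 1
--             blocks.append(lines[i + 1:j])
--             i = j
--         else:
--             i += 1
--     return blocks
--
--
-- def _parse_block(block):
--     grid = [[[] for _ in range(12)] for _ in range(2)]  # 2 days, 12 shifts
--     day = None
--     for line in block:
--         if "Day" in line and ":" in line:
--             day = int(line.split("Day")[1].split(":")[0].strip())
--         elif "Shift" in line and ":" in line and day is not None:
--             parts = line.split(":")
--             shift_num = int(parts[0].split("Shift")[1].strip())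
--             if parts[1].strip() != "No rehearsals":
--                 grid[day][shift_num] = [m.strip() for m in parts[1].split(",")]
--     return grid
--
--
-- def parse_solution_output(output_text):
--     """Parse the solution output from the solver to extract schedule data."""
--     return [_parse_block(b) for b in _split_blocks(output_text.split('\n'))]
-- ===== Notes on version B (the rewrite author's own statement) =====
-- stated objective: alternative
-- what changed: Replaces A's flat state-machine loop (solutions/current_solution/current_day mutated across all lines) by a two-phase decomposition: split the lines into per-marker blocks (dropping text before the first marker), then parse each block independently into its 2x12 grid.
import Mathlib
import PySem

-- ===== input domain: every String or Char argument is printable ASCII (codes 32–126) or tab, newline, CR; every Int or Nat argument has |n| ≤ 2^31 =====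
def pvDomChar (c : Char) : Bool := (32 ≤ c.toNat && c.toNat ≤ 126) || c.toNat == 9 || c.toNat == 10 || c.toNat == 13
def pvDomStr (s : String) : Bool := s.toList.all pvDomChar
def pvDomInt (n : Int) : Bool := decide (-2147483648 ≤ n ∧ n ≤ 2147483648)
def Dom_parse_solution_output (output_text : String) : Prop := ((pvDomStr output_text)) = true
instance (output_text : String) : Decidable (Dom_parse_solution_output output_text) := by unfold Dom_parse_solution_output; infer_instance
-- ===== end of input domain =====

-- B replaces A's flat state-machine loop by a split-into-blocks-then-parse-each-block decomposition
-- (same O(n) cost, different structure); A = B is proved on all of Pre_, outside which Python A raises.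

-- ===== PORT A =====
-- shared line-level parsing helpers (identical expressions in both Pythons)
def pvMarker : String := "=== Rehearsal Schedule Solution"

def pvGrid0 : List (List (List String)) := List.replicate 2 (List.replicate 12 ([] : List String))

def pvLines (t : String) : List String := (PySem.Str.split? t "\n").getD []

-- line.split(":")
def pvParts (line : String) : List String := (PySem.Str.split? line ":").getD []

-- line.split("Day")[1].split(":")[0].strip()
def pvDayStr (line : String) : String :=
  PySem.Str.strip (PySem.List.pyGetD ((PySem.Str.split? (PySem.List.pyGetD ((PySem.Str.split? line "Day").getD []) 1 "") ":").getD []) 0 "")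

-- int(...) of the above; total form (.getD 0), exact under Pre_ (none = ValueError is excluded)
def pvDayNum (line : String) : Int := (PySem.Int.ofStr? (pvDayStr line)).getD 0

-- parts[0].split("Shift")[1].strip()
def pvShiftStr (line : String) : String :=
  PySem.Str.strip (PySem.List.pyGetD ((PySem.Str.split? (PySem.List.pyGetD (pvParts line) 0 "") "Shift").getD []) 1 "")

def pvShiftNum (line : String) : Int := (PySem.Int.ofStr? (pvShiftStr line)).getD 0

-- [m.strip() for m in parts[1].split(",")]
def pvMembers (line : String) : List String :=
  ((PySem.Str.split? (PySem.List.pyGetD (pvParts line) 1 "") ",").getD []).map PySem.Str.strip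

-- current_solution[current_day][shift_num] = members  (negative indices wrap, as in Python; exact under Pre_'s in-range bounds)
def pvAssign (g : List (List (List String))) (d k : Int) (ms : List String) : List (List (List String)) :=
  PySem.List.pySetD g d (PySem.List.pySetD (PySem.List.pyGetD g d []) k ms)

-- one iteration of A's for-loop over (solutions, current_solution, current_day)
def pvStepA (st : List (List (List (List String))) × Option (List (List (List String))) × Option Int)
    (line : String) : List (List (List (List String))) × Option (List (List (List String))) × Option Int :=
  if PySem.Str.isIn pvMarker line then
    ((match st.2.1 with | some s => st.1 ++ [s] | none => st.1), some pvGrid0, none)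
  else if PySem.Str.isIn "Day" line && PySem.Str.isIn ":" line then
    (st.1, st.2.1, some (pvDayNum line))
  else if PySem.Str.isIn "Shift" line && PySem.Str.isIn ":" line then
    match st.2.1, st.2.2 with
    | some sol, some d =>
      if 1 < (pvParts line).length ∧ PySem.Str.strip (PySem.List.pyGetD (pvParts line) 1 "") ≠ "No rehearsals" then
        (st.1, some (pvAssign sol d (pvShiftNum line) (pvMembers line)), st.2.2)
      else st
    | _, _ => st
  else st

def parse_solution_output (output_text : String) : List (List (List (List String))) :=
  let fin := (pvLines output_text).foldl pvStepA ([], none, none)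
  match fin.2.1 with
  | some s => fin.1 ++ [s]
  | none => fin.1

-- ===== PORT B =====
def pvNotMarker (line : String) : Bool := !(PySem.Str.isIn pvMarker line)

-- _split_blocks: one block of lines per marker line, text before the first marker dropped
def pvSplitBlocks : List String → List (List String)
  | [] => []
  | l :: ls =>
    if pvNotMarker l then pvSplitBlocks ls
    else ls.takeWhile pvNotMarker :: pvSplitBlocks (ls.dropWhile pvNotMarker)
termination_by ls => ls.length
decreasing_by
  · simp
  · have := List.length_dropWhile_le (p := pvNotMarker) (l := ls)
    simp only [List.length_cons]
    omega

-- one iteration of _parse_block's loop over (grid, day)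
def pvStepB (st : List (List (List String)) × Option Int) (line : String) :
    List (List (List String)) × Option Int :=
  if PySem.Str.isIn "Day" line && PySem.Str.isIn ":" line then
    (st.1, some (pvDayNum line))
  else if PySem.Str.isIn "Shift" line && PySem.Str.isIn ":" line then
    match st.2 with
    | some d =>
      if PySem.Str.strip (PySem.List.pyGetD (pvParts line) 1 "") ≠ "No rehearsals" then
        (pvAssign st.1 d (pvShiftNum line) (pvMembers line), st.2)
      else st
    | none => st
  else st

def pvParseBlock (block : List String) : List (List (List String)) :=
  (block.foldl pvStepB (pvGrid0, none)).1

def parse_solution_output_alt (output_text : String) : List (List (List (List String))) :=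
  (pvSplitBlocks (pvLines output_text)).map pvParseBlock

-- ===== PRECONDITION & SPEC =====
-- line classification, exactly A's branch order (marker first, then Day, then Shift)
def pvIsMarkerL (l : String) : Bool := PySem.Str.isIn pvMarker l
def pvIsDayL (l : String) : Bool :=
  !pvIsMarkerL l && PySem.Str.isIn "Day" l && PySem.Str.isIn ":" l
def pvIsShiftL (l : String) : Bool :=
  !pvIsMarkerL l && !(PySem.Str.isIn "Day" l && PySem.Str.isIn ":" l) &&
    PySem.Str.isIn "Shift" l && PySem.Str.isIn ":" l

-- current_day just before line i: value of the most recent Day header with no marker in between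
def pvDayAt (L : List String) (i : Nat) : Option Int :=
  (L.take i).foldl
    (fun od l =>
      if pvIsMarkerL l then none
      else if PySem.Str.isIn "Day" l && PySem.Str.isIn ":" l then some (pvDayNum l)
      else od) none

-- a shift line that A actually parses must not raise: the shift keyword occurs before the first
-- colon, its number parses, and (unless the no-rehearsals text follows) the day/shift indices
-- fall inside the 2x12 grid
def pvShiftLineOk (l : String) (d : Int) : Bool :=
  PySem.Str.isIn "Shift" (PySem.List.pyGetD (pvParts l) 0 "") &&
  (PySem.Int.ofStr? (pvShiftStr l)).isSome &&
  (PySem.Str.strip (PySem.List.pyGetD (pvParts l) 1 "") == "No rehearsals" ||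
   (decide (-2 ≤ d ∧ d < 2) && decide (-12 ≤ pvShiftNum l ∧ pvShiftNum l < 12)))

-- Pre_ excludes exactly the inputs on which Python A raises: a day header whose int() fails
-- (ValueError), or a shift line reached with an active solution and day whose shift number is
-- missing or unparsable (IndexError/ValueError) or whose day/shift index leaves the 2x12 grid
-- (IndexError). Every input on which A returns satisfies Pre_.
def Pre_parse_solution_output (output_text : String) : Prop :=
  ∀ i < (pvLines output_text).length,
    (pvIsDayL ((pvLines output_text).getD i "") = true →
      (PySem.Int.ofStr? (pvDayStr ((pvLines output_text).getD i ""))).isSome = true) ∧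
    ((pvIsShiftL ((pvLines output_text).getD i "") &&
        ((pvLines output_text).take i).any pvIsMarkerL) = true →
      ((pvDayAt (pvLines output_text) i).all
        (fun d => pvShiftLineOk ((pvLines output_text).getD i "") d)) = true)

instance (output_text : String) : Decidable (Pre_parse_solution_output output_text) := by
  unfold Pre_parse_solution_output; infer_instance

def pvWitness_parse_solution_output : String :=
  "=== Rehearsal Schedule Solution 1 ===\nDay 0:\nShift 2: Alice, Bob\nShift 3: No rehearsals"

def Spec_parse_solution_output (output_text : String) (out : List (List (List (List String)))) : Prop := out = parse_solution_output_alt output_text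
instance (output_text : String) (out : List (List (List (List String)))) : Decidable (Spec_parse_solution_output output_text out) := by unfold Spec_parse_solution_output; infer_instance

-- ===== CLAIM (what is proved, stated in full; the proofs are below) =====
def Claim_equal_parse_solution_output : Prop := ∀ (output_text : String), Dom_parse_solution_output output_text → Pre_parse_solution_output output_text → Spec_parse_solution_output output_text (parse_solution_output output_text)

-- ===== LEMMAS AND PROOFS =====

-- splitOn.go yields at least one piece beyond the accumulator
theorem pv_splitOn_go_len1 (sep : List Char) (fuel : Nat) :
    ∀ (l cur : List Char) (acc : List (List Char)),
      acc.length + 1 ≤ (PySem.Chars.splitOn.go sep fuel l cur acc).length := by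
  induction fuel with
  | zero => intro l cur acc; simp [PySem.Chars.splitOn.go]
  | succ f ih =>
    intro l cur acc
    cases l with
    | nil => simp [PySem.Chars.splitOn.go]
    | cons c rest =>
      simp only [PySem.Chars.splitOn.go]
      split
      · have := ih (List.drop sep.length (c :: rest)) [] (cur.reverse :: acc)
        simp at this ⊢; omega
      · exact ih rest (c :: cur) acc

-- if the separator occurs in l and the fuel is adequate, splitOn.go yields at least two pieces beyond acc
theorem pv_splitOn_go_len2 (sep : List Char) (hsep : sep ≠ []) (fuel : Nat) :
    ∀ (l cur : List Char) (acc : List (List Char)), sep <:+: l → l.length < fuel →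
      acc.length + 2 ≤ (PySem.Chars.splitOn.go sep fuel l cur acc).length := by
  induction fuel with
  | zero => intro l cur acc _ h; omega
  | succ f ih =>
    intro l cur acc hinf hlen
    cases l with
    | nil =>
      exact absurd (List.eq_nil_of_infix_nil hinf) hsep
    | cons c rest =>
      simp only [PySem.Chars.splitOn.go]
      split
      · have := pv_splitOn_go_len1 sep f (List.drop sep.length (c :: rest)) [] (cur.reverse :: acc)
        simp at this ⊢; omega
      · rename_i hpre
        have hinf' : sep <:+: rest := by
          rcases hinf with ⟨s, t, hst⟩
          cases s with
          | nil =>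
            simp at hst
            exact absurd (List.isPrefixOf_iff_prefix.mpr ⟨t, hst⟩) hpre
          | cons a s' =>
            simp at hst
            exact ⟨s', t, by simpa [List.append_assoc] using hst.2⟩
        have : rest.length < f := by simp at hlen; omega
        exact ih rest (c :: cur) acc hinf' this

-- ":" in line  →  line.split(":") has more than one part
theorem pv_parts_len (line : String) (h : PySem.Str.isIn ":" line = true) :
    1 < (pvParts line).length := by
  have hinf : (":" : String).toList <:+: line.toList := (PySem.Str.isIn_iff_infix ":" line).mp h
  have h2 := pv_splitOn_go_len2 (":".toList) (by decide) (line.toList.length + 1)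
      line.toList [] [] hinf (by omega)
  simp [pvParts, PySem.Str.split?, PySem.Chars.split?, PySem.Chars.splitOn] at h2 ⊢
  omega

-- on a non-marker line, A's step is B's step carried under `some`
theorem pv_step_agree (line : String) (h : pvNotMarker line = true)
    (sols : List (List (List (List String)))) (g : List (List (List String))) (od : Option Int) :
    pvStepA (sols, some g, od) line = (sols, some (pvStepB (g, od) line).1, (pvStepB (g, od) line).2) := by
  have hm : PySem.Str.isIn pvMarker line = false := by
    simpa [pvNotMarker] using h
  simp only [pvStepA, pvStepB, hm, Bool.false_eq_true, if_false]
  by_cases hd : (PySem.Str.isIn "Day" line && PySem.Str.isIn ":" line) = true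
  · simp only [hd, if_true]
  · simp only [if_neg hd]
    by_cases hs : (PySem.Str.isIn "Shift" line && PySem.Str.isIn ":" line) = true
    · simp only [hs, if_true]
      cases od with
      | none => rfl
      | some d =>
        have hcolon : PySem.Str.isIn ":" line = true := ((Bool.and_eq_true _ _).mp hs).2
        have hlen := pv_parts_len line hcolon
        dsimp only
        by_cases hnr : PySem.Str.strip (PySem.List.pyGetD (pvParts line) 1 "") = "No rehearsals"
        · rw [if_neg (fun hc => hc.2 hnr), if_neg (fun hc => hc hnr)]
        · rw [if_pos (show (1 < (pvParts line).length ∧ _) from ⟨hlen, hnr⟩), if_pos hnr]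
    · simp only [if_neg hs]

-- with no current solution, A's step only (possibly) updates the day
theorem pv_stepA_none (line : String) (h : pvNotMarker line = true)
    (sols : List (List (List (List String)))) (od : Option Int) :
    pvStepA (sols, none, od) line =
      (sols, none, if PySem.Str.isIn "Day" line && PySem.Str.isIn ":" line then some (pvDayNum line) else od) := by
  have hm : PySem.Str.isIn pvMarker line = false := by
    simpa [pvNotMarker] using h
  simp only [pvStepA, hm, Bool.false_eq_true, if_false]
  by_cases hd : (PySem.Str.isIn "Day" line && PySem.Str.isIn ":" line) = true
  · simp only [hd, if_true]
  · simp only [if_neg hd]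
    by_cases hs : (PySem.Str.isIn "Shift" line && PySem.Str.isIn ":" line) = true
    · simp only [hs, if_true]
    · simp only [if_neg hs]

-- pvAfinal: the final append of A's loop
def pvAfinal (st : List (List (List (List String))) × Option (List (List (List String))) × Option Int) :
    List (List (List (List String))) :=
  match st.2.1 with
  | some s => st.1 ++ [s]
  | none => st.1

theorem pv_inner (ls : List String) :
    ∀ (sols : List (List (List (List String)))) (g : List (List (List String))) (od : Option Int),
      pvAfinal (ls.foldl pvStepA (sols, some g, od)) =
        sols ++ ((ls.takeWhile pvNotMarker).foldl pvStepB (g, od)).1 ::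
          (pvSplitBlocks (ls.dropWhile pvNotMarker)).map pvParseBlock := by
  induction ls with
  | nil => intro sols g od; simp [pvAfinal, pvSplitBlocks]
  | cons l ls ih =>
    intro sols g od
    by_cases h : pvNotMarker l = true
    · rw [List.foldl_cons, pv_step_agree l h sols g od]
      simpa [h, List.takeWhile_cons, List.dropWhile_cons] using
        ih sols (pvStepB (g, od) l).1 (pvStepB (g, od) l).2
    · have hm : PySem.Str.isIn pvMarker l = true := by
        simpa [pvNotMarker] using h
      have hA : pvStepA (sols, some g, od) l = (sols ++ [g], some pvGrid0, none) := by
        simp only [pvStepA, hm, if_true]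
      rw [List.foldl_cons, hA, ih (sols ++ [g]) pvGrid0 none]
      simp [h, pvSplitBlocks, pvParseBlock]

theorem pv_outer (ls : List String) :
    ∀ (sols : List (List (List (List String)))) (od : Option Int),
      pvAfinal (ls.foldl pvStepA (sols, none, od)) = sols ++ (pvSplitBlocks ls).map pvParseBlock := by
  induction ls with
  | nil => intro sols od; simp [pvAfinal, pvSplitBlocks]
  | cons l ls ih =>
    intro sols od
    by_cases h : pvNotMarker l = true
    · rw [List.foldl_cons, pv_stepA_none l h sols od, ih sols _]
      simp [pvSplitBlocks, h]
    · have hm : PySem.Str.isIn pvMarker l = true := by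
        simpa [pvNotMarker] using h
      have hA : pvStepA (sols, none, od) l = (sols, some pvGrid0, none) := by
        simp only [pvStepA, hm, if_true]
      rw [List.foldl_cons, hA, pv_inner ls sols pvGrid0 none]
      simp [pvSplitBlocks, h, pvParseBlock]

-- ===== VERDICT (by name: the statement is the Claim_ definition above) =====
theorem parse_solution_output_spec : Claim_equal_parse_solution_output := by
  intro t _ _
  unfold Spec_parse_solution_output parse_solution_output parse_solution_output_alt
  have := pv_outer (pvLines t) [] none
  simpa [pvAfinal] using this
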